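-- pv_equiv track=rewrite | github.com/acrucha/ihs-project-genius | project/Utils.py | seven_segment_encoder
-- ===== SOURCE A (Python) =====
-- cad_display = {
--     0 : 0b01000000,
--     1 : 0b01111001,
--     2 : 0b00100100,
--     3 : 0b00110000,
--     4 : 0b00011001,
--     5 : 0b00010010,
--     6 : 0b00000010,
--     7 : 0b01111000,
--     8 : 0b00000000,
--     9 : 0b00010000,
--     "OFF" : 0b11111111
-- }
--
-- def seven_segment_encoder(num):
--     display = 0
--     num_digits = 0
--
--     while True:
--         digit = num%10
--         display |= (cad_display[digit] << 8*num_digits)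
--         num_digits += 1
--         num = num//10
--
--         if num == 0:
--             break
--
--     for i in range (num_digits, num_digits + (4-num_digits)):
--         display |= (cad_display["OFF"] << 8*i)
--
--     return display
-- ===== SOURCE B (Python) =====
-- cad_display = {
--     0 : 0b01000000,
--     1 : 0b01111001,
--     2 : 0b00100100,
--     3 : 0b00110000,
--     4 : 0b00011001,
--     5 : 0b00010010,
--     6 : 0b00000010,
--     7 : 0b01111000,
--     8 : 0b00000000,
--     9 : 0b00010000,
--     "OFF" : 0b11111111
-- }
--
-- def seven_segment_encoder(num):
--     def go(n):
--         # returns (encoding of n's digits, digit count), most significant digit first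
--         if n < 10:
--             return cad_display[n], 1
--         hi, c = go(n // 10)
--         return (hi << 8) | cad_display[n % 10], c + 1
--     display, c = go(num)
--     if c < 4:
--         # OFF = 0xFF fills a whole byte, so the padding is one closed-form mask
--         display |= (1 << 32) - (1 << (8 * c))
--     return display
-- ===== Notes on version B (the rewrite author's own statement) =====
-- stated objective: simpler
-- what changed: Replaces A's LSB-first while-loop plus a separate OFF-padding for-loop by a most-significant-digit-first recursion and a single closed-form padding mask (OFF=0xFF fills whole bytes).
import Mathlib
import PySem

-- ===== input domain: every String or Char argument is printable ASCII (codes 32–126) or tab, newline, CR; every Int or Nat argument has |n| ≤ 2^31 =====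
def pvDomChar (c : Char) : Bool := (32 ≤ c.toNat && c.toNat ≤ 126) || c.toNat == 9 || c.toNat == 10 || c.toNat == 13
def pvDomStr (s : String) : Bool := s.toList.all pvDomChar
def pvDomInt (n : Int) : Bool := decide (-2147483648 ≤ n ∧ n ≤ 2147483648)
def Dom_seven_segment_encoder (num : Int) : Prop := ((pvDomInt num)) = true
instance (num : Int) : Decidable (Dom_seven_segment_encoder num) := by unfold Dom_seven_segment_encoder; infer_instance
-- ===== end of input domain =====

-- B replaces A's LSB-first while-loop plus OFF-padding for-loop by a most-significant-first
-- recursion over the digits and a single closed-form padding mask (return value only; no mutation).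

-- ===== PORT A =====

-- the int-keyed entries of cad_display; under Pre_ it is only looked up at digits 0..9
-- (the final 0 is unreachable there)
def cad_digit (d : Int) : Int :=
  if d = 0 then 0b01000000 else if d = 1 then 0b01111001 else
  if d = 2 then 0b00100100 else if d = 3 then 0b00110000 else
  if d = 4 then 0b00011001 else if d = 5 then 0b00010010 else
  if d = 6 then 0b00000010 else if d = 7 then 0b01111000 else
  if d = 8 then 0b00000000 else if d = 9 then 0b00010000 else 0

-- A's 'while True' loop; fuel num.natAbs + 1 suffices for every num ≥ 0 (Pre_);
-- on num < 0 the Python loop never terminates, which Pre_ excludes.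
-- num_digits ≥ 0 always, so the shift (8*nd).toNat is exactly Python's << 8*num_digits.
def segLoopA : Nat → Int → Int → Int → Int × Int
  | 0, _, display, nd => (display, nd)
  | fuel+1, num, display, nd =>
    let digit := PySem.Int.mod num 10
    let display := PySem.Int.bor display (cad_digit digit <<< (8 * nd).toNat)
    let nd := nd + 1
    let num := PySem.Int.floordiv num 10
    if num = 0 then (display, nd) else segLoopA fuel num display nd

def seven_segment_encoder (num : Int) : Int :=
  let r := segLoopA (num.natAbs + 1) num 0 0
  -- for i in range(num_digits, num_digits + (4 - num_digits)): display |= OFF << 8*i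
  (PySem.List.pyRange r.2 (r.2 + (4 - r.2)) 1).foldl
    (fun d i => PySem.Int.bor d ((0b11111111 : Int) <<< (8 * i).toNat)) r.1

-- ===== PORT B =====

-- B's inner recursion go(n): (encoding of n's digits, digit count), MSB first
def segGoB (n : Int) : Int × Int :=
  if n < 10 then (cad_digit n, 1)
  else
    let r := segGoB (PySem.Int.floordiv n 10)
    (PySem.Int.bor (r.1 <<< (8 : Nat)) (cad_digit (PySem.Int.mod n 10)), r.2 + 1)
termination_by n.toNat
decreasing_by
  simp only [not_lt] at *
  rw [PySem.Int.floordiv_eq_ediv_of_pos (by omega)]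
  omega

def seven_segment_encoder_alt (num : Int) : Int :=
  let r := segGoB num
  if r.2 < 4 then
    -- c ≥ 1 always, so the shift (8*c).toNat is exactly Python's << (8*c)
    PySem.Int.bor r.1 ((1 <<< 32) - (1 <<< (8 * r.2).toNat))
  else r.1

-- ===== PRECONDITION & SPEC =====
-- Pre_ excludes num < 0: there A's while-loop never terminates (num//10 stays -1), so A returns on exactly num ≥ 0.
def Pre_seven_segment_encoder (num : Int) : Prop := 0 ≤ num
instance (num : Int) : Decidable (Pre_seven_segment_encoder num) := by unfold Pre_seven_segment_encoder; infer_instance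
def pvWitness_seven_segment_encoder : Int := (42)

def Spec_seven_segment_encoder (num : Int) (out : Int) : Prop := out = seven_segment_encoder_alt num
instance (num : Int) (out : Int) : Decidable (Spec_seven_segment_encoder num out) := by unfold Spec_seven_segment_encoder; infer_instance

-- ===== CLAIM (what is proved, stated in full; the proofs are below) =====
def Claim_equal_seven_segment_encoder : Prop := ∀ (num : Int), Dom_seven_segment_encoder num → Pre_seven_segment_encoder num → Spec_seven_segment_encoder num (seven_segment_encoder num)

-- ===== LEMMAS AND PROOFS =====

-- Nat-valued model of B's recursion (proof-side only)
def cadN (d : Nat) : Nat :=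
  if d = 0 then 0b01000000 else if d = 1 then 0b01111001 else
  if d = 2 then 0b00100100 else if d = 3 then 0b00110000 else
  if d = 4 then 0b00011001 else if d = 5 then 0b00010010 else
  if d = 6 then 0b00000010 else if d = 7 then 0b01111000 else
  if d = 8 then 0b00000000 else if d = 9 then 0b00010000 else 0

def goN (n : Nat) : Nat × Nat :=
  if n < 10 then (cadN n, 1)
  else
    let r := goN (n / 10)
    ((r.1 <<< 8) ||| cadN (n % 10), r.2 + 1)
decreasing_by omega

lemma fd10 (n : Nat) : PySem.Int.floordiv (n : Int) 10 = ((n / 10 : Nat) : Int) := by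
  exact_mod_cast PySem.Int.floordiv_natCast n 10

lemma md10 (n : Nat) : PySem.Int.mod (n : Int) 10 = ((n % 10 : Nat) : Int) := by
  exact_mod_cast PySem.Int.mod_natCast n 10

set_option maxHeartbeats 1000000 in
lemma cad_digit_natCast (n : Nat) : cad_digit (n : Int) = ((cadN n : Nat) : Int) := by
  by_cases h : n < 10
  · obtain _|_|_|_|_|_|_|_|_|_|m := n
    all_goals first | decide | omega
  · have h0 : ¬((n : Int) = 0) := by omega
    have h1 : ¬((n : Int) = 1) := by omega
    have h2 : ¬((n : Int) = 2) := by omega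
    have h3 : ¬((n : Int) = 3) := by omega
    have h4 : ¬((n : Int) = 4) := by omega
    have h5 : ¬((n : Int) = 5) := by omega
    have h6 : ¬((n : Int) = 6) := by omega
    have h7 : ¬((n : Int) = 7) := by omega
    have h8 : ¬((n : Int) = 8) := by omega
    have h9 : ¬((n : Int) = 9) := by omega
    have g0 : ¬(n = 0) := by omega
    have g1 : ¬(n = 1) := by omega
    have g2 : ¬(n = 2) := by omega
    have g3 : ¬(n = 3) := by omega
    have g4 : ¬(n = 4) := by omega
    have g5 : ¬(n = 5) := by omega
    have g6 : ¬(n = 6) := by omega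
    have g7 : ¬(n = 7) := by omega
    have g8 : ¬(n = 8) := by omega
    have g9 : ¬(n = 9) := by omega
    simp only [cad_digit, cadN, h0, h1, h2, h3, h4, h5, h6, h7, h8, h9, g0, g1, g2, g3, g4, g5, g6, g7, g8, g9, if_false]
    simp

lemma int_shiftLeft_natCast (m k : Nat) : ((m : Int) <<< k) = ((m <<< k : Nat) : Int) := by
  simp [Int.shiftLeft_eq, Nat.shiftLeft_eq]

lemma segGoB_natCast (n : Nat) : segGoB (n : Int) = (((goN n).1 : Int), ((goN n).2 : Int)) := by
  induction n using Nat.strong_induction_on with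
  | _ n ih =>
    rw [segGoB, goN]
    by_cases h : n < 10
    · have h10 : ((n : Int) < 10) := by omega
      simp only [h, h10, if_true, cad_digit_natCast]
      norm_num
    · have h10 : ¬ ((n : Int) < 10) := by omega
      simp only [h, h10, if_false]
      rw [fd10, md10, ih (n / 10) (by omega), cad_digit_natCast]
      dsimp only
      rw [int_shiftLeft_natCast, PySem.Int.bor_natCast]
      norm_num

lemma segLoopA_eq (fuel : Nat) (n disp nd : Nat) (hf : n < fuel) :
    segLoopA fuel (n : Int) (disp : Int) (nd : Int) =
      (((disp ||| ((goN n).1 <<< (8 * nd)) : Nat) : Int), ((nd : Int) + ((goN n).2 : Int))) := by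
  induction fuel generalizing n disp nd with
  | zero => omega
  | succ fuel ih =>
    simp only [segLoopA]
    rw [goN]
    have h8 : ((8 * (nd : Int)).toNat) = 8 * nd := by omega
    by_cases h : n < 10
    · have hz : PySem.Int.floordiv (n : Int) 10 = 0 := by rw [fd10]; simp; omega
      simp only [hz, if_true, h, if_true]
      rw [md10, cad_digit_natCast, h8, int_shiftLeft_natCast, PySem.Int.bor_natCast]
      have hmn : n % 10 = n := by omega
      simp [hmn]
    · have hnz : ¬ (PySem.Int.floordiv (n : Int) 10 = 0) := by rw [fd10]; simp; omega
      simp only [hnz, if_false, h, if_false]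
      rw [md10, cad_digit_natCast, h8, int_shiftLeft_natCast, PySem.Int.bor_natCast, fd10]
      have h1 : ((nd : Int) + 1) = ((nd + 1 : Nat) : Int) := by push_cast; ring
      rw [h1, ih (n / 10) _ (nd + 1) (by omega)]
      rw [Prod.mk.injEq]
      constructor
      · congr 1
        rw [Nat.or_assoc]
        congr 1
        rw [Nat.or_comm, Nat.shiftLeft_or_distrib, ← Nat.shiftLeft_add]
        congr 2
        omega
      · push_cast; ring

-- goN always reports at least one digit
lemma goN_count_pos (n : Nat) : 1 ≤ (goN n).2 := by
  rw [goN]; split <;> simp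

-- the OFF-padding for-loop equals B's closed-form mask
lemma pad_eq (d c : Nat) (hc : 1 ≤ c) :
    (PySem.List.pyRange (c : Int) ((c : Int) + (4 - (c : Int))) 1).foldl
      (fun d i => PySem.Int.bor d ((0b11111111 : Int) <<< (8 * i).toNat)) ((d : Nat) : Int) =
      (if ((c : Nat) : Int) < 4 then
        PySem.Int.bor ((d : Nat) : Int)
          (((1 <<< 32 : Nat) : Int) - ((1 <<< (8 * ((c : Nat) : Int)).toNat : Nat) : Int))
      else ((d : Nat) : Int)) := by
  have h4 : ((c : Int) + (4 - (c : Int))) = 4 := by ring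
  rw [h4]
  by_cases hc4 : c < 4
  · have hc4' : ((c : Nat) : Int) < 4 := by omega
    rw [if_pos hc4']
    interval_cases c
    · -- c = 1
      simp only [Nat.cast_one]
      have hr : PySem.List.pyRange (1 : Int) 4 1 = [1, 2, 3] := by decide
      have hm : ((1 <<< 32 : Nat) : Int) - ((1 <<< (8 * (1 : Int)).toNat : Nat) : Int) = ((4294967040 : Nat) : Int) := by decide
      have e1 : ((0b11111111 : Int) <<< ((((8 * (1 : Int)).toNat) : Nat) : Int)) = ((65280 : Nat) : Int) := by decide
      have e2 : ((0b11111111 : Int) <<< ((((8 * (2 : Int)).toNat) : Nat) : Int)) = ((16711680 : Nat) : Int) := by decide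
      have e3 : ((0b11111111 : Int) <<< ((((8 * (3 : Int)).toNat) : Nat) : Int)) = ((4278190080 : Nat) : Int) := by decide
      rw [hr, hm]
      simp only [List.foldl]
      rw [e1, e2, e3, PySem.Int.bor_natCast, PySem.Int.bor_natCast, PySem.Int.bor_natCast,
        PySem.Int.bor_natCast, Nat.or_assoc, Nat.or_assoc]
      congr 2
    · -- c = 2
      simp only [Nat.cast_ofNat]
      have hr : PySem.List.pyRange (2 : Int) 4 1 = [2, 3] := by decide
      have hm : ((1 <<< 32 : Nat) : Int) - ((1 <<< (8 * (2 : Int)).toNat : Nat) : Int) = ((4294901760 : Nat) : Int) := by decide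
      have e2 : ((0b11111111 : Int) <<< ((((8 * (2 : Int)).toNat) : Nat) : Int)) = ((16711680 : Nat) : Int) := by decide
      have e3 : ((0b11111111 : Int) <<< ((((8 * (3 : Int)).toNat) : Nat) : Int)) = ((4278190080 : Nat) : Int) := by decide
      rw [hr, hm]
      simp only [List.foldl]
      rw [e2, e3, PySem.Int.bor_natCast, PySem.Int.bor_natCast, PySem.Int.bor_natCast, Nat.or_assoc]
      congr 2
    · -- c = 3
      simp only [Nat.cast_ofNat]
      have hr : PySem.List.pyRange (3 : Int) 4 1 = [3] := by decide
      have hm : ((1 <<< 32 : Nat) : Int) - ((1 <<< (8 * (3 : Int)).toNat : Nat) : Int) = ((4278190080 : Nat) : Int) := by decide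
      have e3 : ((0b11111111 : Int) <<< ((((8 * (3 : Int)).toNat) : Nat) : Int)) = ((4278190080 : Nat) : Int) := by decide
      rw [hr, hm]
      simp only [List.foldl]
      rw [e3, PySem.Int.bor_natCast]
  · have hnil : PySem.List.pyRange (c : Int) 4 1 = [] := PySem.List.pyRange_one_eq_nil (by omega)
    rw [hnil, if_neg (by omega)]
    rfl

-- ===== VERDICT (by name: the statement is the Claim_ definition above) =====
theorem seven_segment_encoder_spec : Claim_equal_seven_segment_encoder := by
  intro num _ hpre
  unfold Pre_seven_segment_encoder at hpre
  unfold Spec_seven_segment_encoder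
  obtain ⟨n, rfl⟩ : ∃ m : Nat, num = (m : Int) := ⟨num.toNat, by omega⟩
  unfold seven_segment_encoder seven_segment_encoder_alt
  rw [show (0 : Int) = ((0 : Nat) : Int) from rfl]
  rw [segLoopA_eq (((n : Int)).natAbs + 1) n 0 0 (by omega), segGoB_natCast]
  dsimp only
  simp only [Nat.zero_or, Nat.mul_zero, Nat.shiftLeft_zero, Nat.cast_zero, Int.zero_add]
  exact pad_eq (goN n).1 (goN n).2 (goN_count_pos n)
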